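-- pv_equiv track=rewrite | github.com/AlexandarEfremov/codewars_exercises | the_latest_clock.py | late_clock
-- ===== SOURCE A (Python) =====
-- from itertools import permutations
--
-- def late_clock(a, b, c, d):
--     numbers = [str(a), str(b), str(c), str(d)]
--
--     all_permutations = permutations(numbers, 4)
--     maximum_time = "00:00"
--
--     for perm in all_permutations:
--         hour = perm[0] + perm[1]
--         minute = perm[2] + perm[3]
--
--         time_string = hour + ":" + minute
--         if "00" <= hour <= "23" and "00" <= minute <= "59":
--             if time_string > maximum_time:
--                 maximum_time = time_string
--     return maximum_time
-- ===== SOURCE B (Python) =====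
-- def late_clock(a, b, c, d):
--     strs = [str(a), str(b), str(c), str(d)]
--     best = "00:00"
--     for i in range(4):
--         for j in range(4):
--             if i == j:
--                 continue
--             hour = strs[i] + strs[j]
--             if hour < "00" or "23" < hour:
--                 continue
--             r, s = [strs[k] for k in range(4) if k != i and k != j]
--             lo, hi = (r + s, s + r) if r + s <= s + r else (s + r, r + s)
--             if "00" <= hi <= "59":
--                 minute = hi
--             elif "00" <= lo <= "59":
--                 minute = lo
--             else:
--                 continue
--             t = hour + ":" + minute
--             if t > best:
--                 best = t
--     return best
-- ===== Notes on version B (the rewrite author's own statement) =====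
-- stated objective: alternative
-- what changed: Instead of scanning all 24 ordered permutations of the four digit strings and keeping a running lexicographic maximum over full time strings, B loops over the 12 hour index pairs with early filters, greedily picks the best valid minute from the two arrangements of the remaining two strings, and keeps a running max of one candidate per pair.
import Mathlib
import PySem

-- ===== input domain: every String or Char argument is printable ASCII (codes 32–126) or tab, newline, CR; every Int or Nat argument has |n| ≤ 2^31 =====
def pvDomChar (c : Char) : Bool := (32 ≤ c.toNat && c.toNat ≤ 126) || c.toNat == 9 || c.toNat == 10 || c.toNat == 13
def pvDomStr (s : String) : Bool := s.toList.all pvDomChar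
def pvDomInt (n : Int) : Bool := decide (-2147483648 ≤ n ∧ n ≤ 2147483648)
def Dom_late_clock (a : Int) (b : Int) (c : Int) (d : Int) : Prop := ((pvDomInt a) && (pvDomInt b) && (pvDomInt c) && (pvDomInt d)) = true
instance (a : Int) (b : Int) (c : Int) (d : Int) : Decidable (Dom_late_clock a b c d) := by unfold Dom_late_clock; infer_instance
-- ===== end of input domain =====

-- B replaces A's scan of all 24 digit-string permutations by a double loop over hour index
-- pairs with early filters and a greedy best-minute choice from the two remaining strings
-- (half the enumeration, alternative decomposition; same exact return value).


-- ===== PORT A =====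
-- numbers = [str(a), str(b), str(c), str(d)]; scan permutations(numbers, 4), keep the lexicographic max valid time string
def late_clock (a : Int) (b : Int) (c : Int) (d : Int) : String :=
  let numbers : List (List Char) :=
    [PySem.Int.toChars a, PySem.Int.toChars b, PySem.Int.toChars c, PySem.Int.toChars d]
  let allPermutations := PySem.List.permutations numbers 4
  let maximumTime := allPermutations.foldl (fun maximumTime perm =>
    let hour := PySem.List.pyGetD perm 0 [] ++ PySem.List.pyGetD perm 1 []
    let minute := PySem.List.pyGetD perm 2 [] ++ PySem.List.pyGetD perm 3 []
    let timeString := hour ++ ':' :: minute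
    if (['0','0'] ≤ hour ∧ hour ≤ ['2','3']) ∧ (['0','0'] ≤ minute ∧ minute ≤ ['5','9']) then
      if maximumTime < timeString then timeString else maximumTime
    else maximumTime) ['0','0',':','0','0']
  String.ofList maximumTime

-- ===== PORT B =====
-- Source B: double loop over hour index pairs (i,j), early filters, greedy best minute from the
-- two remaining strings, running max
def late_clock_alt (a : Int) (b : Int) (c : Int) (d : Int) : String :=
  let strs : List (List Char) :=
    [PySem.Int.toChars a, PySem.Int.toChars b, PySem.Int.toChars c, PySem.Int.toChars d]
  let best := (PySem.List.pyRange 0 4 1).foldl (fun best i =>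
    (PySem.List.pyRange 0 4 1).foldl (fun best j =>
      if i = j then best
      else
        let hour := PySem.List.pyGetD strs i [] ++ PySem.List.pyGetD strs j []
        if hour < ['0','0'] ∨ ['2','3'] < hour then best
        else
          -- r, s = [strs[k] for k in range(4) if k != i and k != j]
          match ((PySem.List.pyRange 0 4 1).filter (fun k => k != i && k != j)).map
              (fun k => PySem.List.pyGetD strs k []) with
          | [r, s] =>
            let lohi := if r ++ s ≤ s ++ r then (r ++ s, s ++ r) else (s ++ r, r ++ s)
            if ['0','0'] ≤ lohi.2 ∧ lohi.2 ≤ ['5','9'] then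
              let t := hour ++ ':' :: lohi.2
              if best < t then t else best
            else if ['0','0'] ≤ lohi.1 ∧ lohi.1 ≤ ['5','9'] then
              let t := hour ++ ':' :: lohi.1
              if best < t then t else best
            else best
          | _ => best  -- unreachable: exactly two indices remain
      ) best
    ) ['0','0',':','0','0']
  String.ofList best

-- ===== PRECONDITION & SPEC =====
def Spec_late_clock (a : Int) (b : Int) (c : Int) (d : Int) (out : String) : Prop :=
  out = late_clock_alt a b c d
instance (a : Int) (b : Int) (c : Int) (d : Int) (out : String) : Decidable (Spec_late_clock a b c d out) := by
  unfold Spec_late_clock; infer_instance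

-- ===== CLAIM (what is proved, stated in full; the proofs are below) =====
def Claim_equal_late_clock : Prop := ∀ (a : Int) (b : Int) (c : Int) (d : Int),
  Dom_late_clock a b c d → Spec_late_clock a b c d (late_clock a b c d)

-- ===== LEMMAS AND PROOFS =====
theorem perm4_explicit {α : Type} (w x y z : α) : PySem.List.permutations [w,x,y,z] 4 =
  [[w,x,y,z],[w,x,z,y],[w,y,x,z],[w,y,z,x],[w,z,x,y],[w,z,y,x],
   [x,w,y,z],[x,w,z,y],[x,y,w,z],[x,y,z,w],[x,z,w,y],[x,z,y,w],
   [y,w,x,z],[y,w,z,x],[y,x,w,z],[y,x,z,w],[y,z,w,x],[y,z,x,w],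
   [z,w,x,y],[z,w,y,x],[z,x,w,y],[z,x,y,w],[z,y,w,x],[z,y,x,w]] := by
  simp [PySem.List.permutations, List.range_succ, List.flatMap]

-- A's loop body as a named function, and the expanded 24-permutation list
def lcStep (maximumTime : List Char) (perm : List (List Char)) : List Char :=
  let hour := PySem.List.pyGetD perm 0 [] ++ PySem.List.pyGetD perm 1 []
  let minute := PySem.List.pyGetD perm 2 [] ++ PySem.List.pyGetD perm 3 []
  let timeString := hour ++ ':' :: minute
  if (['0','0'] ≤ hour ∧ hour ≤ ['2','3']) ∧ (['0','0'] ≤ minute ∧ minute ≤ ['5','9']) then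
    if maximumTime < timeString then timeString else maximumTime
  else maximumTime

def lcL24 (w x y z : List Char) : List (List (List Char)) :=
  [[w,x,y,z],[w,x,z,y],[w,y,x,z],[w,y,z,x],[w,z,x,y],[w,z,y,x],
   [x,w,y,z],[x,w,z,y],[x,y,w,z],[x,y,z,w],[x,z,w,y],[x,z,y,w],
   [y,w,x,z],[y,w,z,x],[y,x,w,z],[y,x,z,w],[y,z,w,x],[y,z,x,w],
   [z,w,x,y],[z,w,y,x],[z,x,w,y],[z,x,y,w],[z,y,w,x],[z,y,x,w]]

theorem late_clock_eq_expanded (a b c d : Int) :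
    late_clock a b c d = String.ofList (List.foldl lcStep ['0','0',':','0','0']
      (lcL24 (PySem.Int.toChars a) (PySem.Int.toChars b) (PySem.Int.toChars c) (PySem.Int.toChars d))) := by
  simp only [late_clock, lcL24, perm4_explicit]
  rfl

-- B's loop body for a fixed hour pair, as a named function
def bStep (best h1 h2 r s : List Char) : List Char :=
  let hour := h1 ++ h2
  if hour < ['0','0'] ∨ ['2','3'] < hour then best
  else
    let lohi := if r ++ s ≤ s ++ r then (r ++ s, s ++ r) else (s ++ r, r ++ s)
    if ['0','0'] ≤ lohi.2 ∧ lohi.2 ≤ ['5','9'] then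
      let t := hour ++ ':' :: lohi.2
      if best < t then t else best
    else if ['0','0'] ≤ lohi.1 ∧ lohi.1 ≤ ['5','9'] then
      let t := hour ++ ':' :: lohi.1
      if best < t then t else best
    else best

theorem alt_eq_expanded (a b c d : Int) :
    late_clock_alt a b c d = String.ofList
      (bStep (bStep (bStep (bStep (bStep (bStep (bStep (bStep (bStep (bStep (bStep (bStep
        ['0','0',':','0','0']
        (PySem.Int.toChars a) (PySem.Int.toChars b) (PySem.Int.toChars c) (PySem.Int.toChars d))
        (PySem.Int.toChars a) (PySem.Int.toChars c) (PySem.Int.toChars b) (PySem.Int.toChars d))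
        (PySem.Int.toChars a) (PySem.Int.toChars d) (PySem.Int.toChars b) (PySem.Int.toChars c))
        (PySem.Int.toChars b) (PySem.Int.toChars a) (PySem.Int.toChars c) (PySem.Int.toChars d))
        (PySem.Int.toChars b) (PySem.Int.toChars c) (PySem.Int.toChars a) (PySem.Int.toChars d))
        (PySem.Int.toChars b) (PySem.Int.toChars d) (PySem.Int.toChars a) (PySem.Int.toChars c))
        (PySem.Int.toChars c) (PySem.Int.toChars a) (PySem.Int.toChars b) (PySem.Int.toChars d))
        (PySem.Int.toChars c) (PySem.Int.toChars b) (PySem.Int.toChars a) (PySem.Int.toChars d))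
        (PySem.Int.toChars c) (PySem.Int.toChars d) (PySem.Int.toChars a) (PySem.Int.toChars b))
        (PySem.Int.toChars d) (PySem.Int.toChars a) (PySem.Int.toChars b) (PySem.Int.toChars c))
        (PySem.Int.toChars d) (PySem.Int.toChars b) (PySem.Int.toChars a) (PySem.Int.toChars c))
        (PySem.Int.toChars d) (PySem.Int.toChars c) (PySem.Int.toChars a) (PySem.Int.toChars b)) := by
  rfl

theorem if_max (m t : List Char) : (if m < t then t else m) = max m t := by
  rcases lt_trichotomy m t with h|h|h <;> simp [h, le_of_lt]

theorem append_lt_append_iff (p u v : List Char) : p ++ u < p ++ v ↔ u < v := by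
  induction p with
  | nil => simp
  | cons a t ih => simpa [List.cons_lt_cons_self] using ih

theorem append_le_append_iff (p u v : List Char) : p ++ u ≤ p ++ v ↔ u ≤ v := by
  rw [← not_lt, ← not_lt, append_lt_append_iff]

-- the two A-steps of one hour pair (minute orders r++s then s++r) equal B's single step
theorem cons_prefix_le (h : List Char) (u v : List Char) (huv : u ≤ v) :
    h ++ ':' :: u ≤ h ++ ':' :: v := by
  have := (append_le_append_iff (h ++ [':']) u v).2 huv
  simpa using this

theorem core_pair (m h1 h2 r s : List Char) :
    lcStep (lcStep m [h1, h2, r, s]) [h1, h2, s, r] = bStep m h1 h2 r s := by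
  have g0 : PySem.List.pyGetD [h1,h2,r,s] 0 [] = h1 := rfl
  have g1 : PySem.List.pyGetD [h1,h2,r,s] 1 [] = h2 := rfl
  have g2 : PySem.List.pyGetD [h1,h2,r,s] 2 [] = r := rfl
  have g3 : PySem.List.pyGetD [h1,h2,r,s] 3 [] = s := rfl
  have g0' : PySem.List.pyGetD [h1,h2,s,r] 0 [] = h1 := rfl
  have g1' : PySem.List.pyGetD [h1,h2,s,r] 1 [] = h2 := rfl
  have g2' : PySem.List.pyGetD [h1,h2,s,r] 2 [] = s := rfl
  have g3' : PySem.List.pyGetD [h1,h2,s,r] 3 [] = r := rfl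
  simp only [lcStep, bStep, g0, g1, g2, g3, g0', g1', g2', g3']
  by_cases hh : ['0','0'] ≤ h1 ++ h2 ∧ h1 ++ h2 ≤ ['2','3']
  · have hg : ¬(h1 ++ h2 < ['0','0'] ∨ ['2','3'] < h1 ++ h2) := by
      exact not_or.2 ⟨not_lt.2 hh.1, not_lt.2 hh.2⟩
    simp only [hh, true_and, if_neg hg, if_max]
    by_cases hcmp : r ++ s ≤ s ++ r
    · simp only [if_pos hcmp]
      by_cases v2 : ['0','0'] ≤ s ++ r ∧ s ++ r ≤ ['5','9'] <;>
        by_cases v1 : ['0','0'] ≤ r ++ s ∧ r ++ s ≤ ['5','9'] <;>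
        simp only [v1, v2, and_self, if_true, if_false]
      · rw [max_assoc, max_eq_right (cons_prefix_le _ _ _ hcmp)]
    · simp only [if_neg hcmp]
      have hcmp' : s ++ r ≤ r ++ s := le_of_not_ge hcmp
      by_cases v1 : ['0','0'] ≤ r ++ s ∧ r ++ s ≤ ['5','9'] <;>
        by_cases v2 : ['0','0'] ≤ s ++ r ∧ s ++ r ≤ ['5','9'] <;>
        simp only [v1, v2, and_self, if_true, if_false]
      · rw [max_assoc, max_eq_left (cons_prefix_le _ _ _ hcmp')]
  · have hg : h1 ++ h2 < ['0','0'] ∨ ['2','3'] < h1 ++ h2 := by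
      rcases not_and_or.1 hh with h | h
      · exact Or.inl (not_le.1 h)
      · exact Or.inr (not_le.1 h)
    simp only [hh, false_and, if_false, if_pos hg]

theorem late_clock_spec : Claim_equal_late_clock := by
  intro a b c d _
  unfold Spec_late_clock
  rw [late_clock_eq_expanded, alt_eq_expanded]
  simp only [lcL24, List.foldl_cons, List.foldl_nil, core_pair]
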